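-- pv_equiv track=rewrite | github.com/2019210654/sostu785ab59e | 2020/lab01/utils/recm.py | init_data_matrix
-- ===== SOURCE A (Python) =====
-- def get_merchandise_score(data_lines, user, merchandise_index):
--     for line in data_lines:
--         if line[0] == user:
--             l_line = list()
--             for element in line.split(' '):
--                 if (element == user) or (not element):
--                     continue
--                 l_line.append(element)
--             return int(l_line[merchandise_index])
--     return 0
--
-- def init_data_matrix(data_lines, users, merchandises):
--     data_matrix = dict()
--     for user in users:
--         data_matrix[user] = dict()
--         for merchandise in merchandises:
--             mindex = merchandises.index(merchandise)
--             mscore = get_merchandise_score(data_lines, user, mindex)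
--             data_matrix[user][merchandise] = mscore
--     return data_matrix
-- ===== SOURCE B (Python) =====
-- def init_data_matrix(data_lines, users, merchandises):
--     # first line per first character (only the first occurrence counts)
--     first_line = {}
--     for line in data_lines:
--         if line and line[0] not in first_line:
--             first_line[line[0]] = line
--     # first index of each merchandise (replicates list.index for duplicates)
--     idx = {}
--     for i, m in enumerate(merchandises):
--         if m not in idx:
--             idx[m] = i
--     result = {}
--     for user in users:
--         line = first_line.get(user)
--         if line is None:
--             result[user] = {m: 0 for m in merchandises}
--         else:
--             tokens = [e for e in line.split(' ') if e and e != user]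
--             result[user] = {m: int(tokens[idx[m]]) for m in merchandises}
--     return result
-- ===== Notes on version B (the rewrite author's own statement) =====
-- stated objective: faster
-- what changed: B parses the data lines once into a first-char->line dict and builds a first-index dict for merchandises, then fills each row with O(1) lookups, replacing A's rescan of all data_lines (with a re-split of the matched line) and merchandises.index call for every (user, merchandise) pair.
import Mathlib
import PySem

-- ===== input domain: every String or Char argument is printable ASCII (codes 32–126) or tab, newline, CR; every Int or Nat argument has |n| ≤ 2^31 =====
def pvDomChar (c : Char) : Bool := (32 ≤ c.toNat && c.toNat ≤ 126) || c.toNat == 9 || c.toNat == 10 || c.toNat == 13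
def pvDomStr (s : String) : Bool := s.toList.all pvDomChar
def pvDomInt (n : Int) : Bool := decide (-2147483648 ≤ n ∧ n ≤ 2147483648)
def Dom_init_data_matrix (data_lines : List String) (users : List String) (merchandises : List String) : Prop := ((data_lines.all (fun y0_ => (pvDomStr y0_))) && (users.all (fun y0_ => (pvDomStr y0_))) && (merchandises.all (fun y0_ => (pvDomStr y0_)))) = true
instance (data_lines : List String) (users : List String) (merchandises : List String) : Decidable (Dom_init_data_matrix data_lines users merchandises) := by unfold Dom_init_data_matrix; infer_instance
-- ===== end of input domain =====

-- B replaces A's per-(user,merchandise) rescan of data_lines and merchandises.index call by two dicts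
-- (first-char -> first line, merchandise -> first index) built once; same return value on Pre_.

-- ===== PORT A =====

-- 'line[0] == user': Python compares the 1-character string line[0] with user; IndexError on "" (outside Pre_, 0 here).
-- int(l_line[mindex]): IndexError/ValueError become none (outside Pre_, 0 here).
def get_merchandise_score (data_lines : List String) (user : String) (merchandise_index : Int) : Int :=
  match data_lines with
  | [] => 0
  | line :: rest =>
      match PySem.Str.pyGet? line 0 with
      | none => 0
      | some c =>
          if String.ofList [c] == user then
            let l_line := ((PySem.Str.split? line " ").getD []).filter
              (fun element => !(element == user || element == ""))
            ((PySem.List.pyGet? l_line merchandise_index).bind PySem.Int.ofStr?).getD 0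
          else get_merchandise_score rest user merchandise_index

def init_data_matrix (data_lines : List String) (users : List String) (merchandises : List String) : List (String × List (String × Int)) :=
  (users.foldl (fun (data_matrix : PySem.Dict String (PySem.Dict String Int)) user =>
      data_matrix.insert user
        (merchandises.foldl (fun (row : PySem.Dict String Int) merchandise =>
            let mindex := PySem.List.index? merchandises merchandise
            let mscore := match mindex with
              | some i => get_merchandise_score data_lines user (i : Int)
              | none => 0   -- unreachable: merchandise ∈ merchandises
            row.insert merchandise mscore) PySem.Dict.empty))
    PySem.Dict.empty).items.map (fun p => (p.1, p.2.items))

-- ===== PORT B =====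

-- first_line: for line in data_lines: if line and line[0] not in first_line: first_line[line[0]] = line
def pvByChar (data_lines : List String) : PySem.Dict String String :=
  data_lines.foldl (fun d line =>
      match PySem.Str.pyGet? line 0 with
      | none => d            -- 'if line' fails: empty line skipped
      | some c => if d.contains (String.ofList [c]) then d else d.insert (String.ofList [c]) line)
    PySem.Dict.empty

-- idx: first index of each merchandise (setdefault-style loop over enumerate)
def pvIdx (merchandises : List String) : PySem.Dict String Int :=
  (PySem.List.enumerate merchandises 0).foldl
    (fun d p => if d.contains p.2 then d else d.insert p.2 p.1) PySem.Dict.empty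

-- tokens = [e for e in line.split(' ') if e and e != user]
def pvTokensB (line user : String) : List String :=
  ((PySem.Str.split? line " ").getD []).filter (fun e => !(e == "") && !(e == user))

def init_data_matrix_alt (data_lines : List String) (users : List String) (merchandises : List String) : List (String × List (String × Int)) :=
  let first_line := pvByChar data_lines
  let idx := pvIdx merchandises
  (users.foldl (fun (result : PySem.Dict String (PySem.Dict String Int)) user =>
      match first_line.get? user with
      | none =>
          result.insert user (merchandises.foldl (fun r m => r.insert m 0) PySem.Dict.empty)
      | some line =>
          let tokens := pvTokensB line user
          result.insert user (merchandises.foldl (fun r m =>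
              r.insert m ((((idx.get? m).bind (fun i => PySem.List.pyGet? tokens i)).bind
                PySem.Int.ofStr?).getD 0)) PySem.Dict.empty))
    PySem.Dict.empty).items.map (fun p => (p.1, p.2.items))

-- ===== PRECONDITION & SPEC =====

-- does this line match user in A's scan (line[0] == user)?
def pvPred (user line : String) : Bool :=
  match PySem.Str.pyGet? line 0 with
  | some c => String.ofList [c] == user
  | none => false

-- Pre_ excludes exactly the inputs where A raises: an empty line reached while scanning for some
-- user (IndexError on line[0]), or a matched line whose filtered token list is too short
-- (IndexError) or whose token at the needed index is not int()-parsable (ValueError).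
def Pre_init_data_matrix (data_lines : List String) (users : List String) (merchandises : List String) : Prop :=
  merchandises = [] ∨ ∀ u ∈ users,
    (∀ l ∈ data_lines.takeWhile (fun l => !pvPred u l), l ≠ "") ∧
    ∀ l ∈ (data_lines.find? (pvPred u)).toList, ∀ m ∈ merchandises,
      ((PySem.List.index? merchandises m).bind (fun k =>
        (PySem.List.pyGet? (pvTokensB l u) (k : Int)).bind PySem.Int.ofStr?)).isSome = true
instance (data_lines : List String) (users : List String) (merchandises : List String) : Decidable (Pre_init_data_matrix data_lines users merchandises) := by unfold Pre_init_data_matrix; infer_instance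

def pvWitness_init_data_matrix : List String × List String × List String :=
  (["u 1 2"], ["u", "v"], ["apple", "banana"])

def Spec_init_data_matrix (data_lines : List String) (users : List String) (merchandises : List String) (out : List (String × List (String × Int))) : Prop := out = init_data_matrix_alt data_lines users merchandises
instance (data_lines : List String) (users : List String) (merchandises : List String) (out : List (String × List (String × Int))) : Decidable (Spec_init_data_matrix data_lines users merchandises out) := by unfold Spec_init_data_matrix; infer_instance

-- ===== CLAIM (what is proved, stated in full; the proofs are below) =====
def Claim_equal_init_data_matrix : Prop := ∀ (data_lines : List String) (users : List String) (merchandises : List String), Dom_init_data_matrix data_lines users merchandises → Pre_init_data_matrix data_lines users merchandises → Spec_init_data_matrix data_lines users merchandises (init_data_matrix data_lines users merchandises)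

-- ===== LEMMAS AND PROOFS =====

theorem scoreA_eq_find (data_lines : List String) (u : String) (i : Int)
    (h : ∀ l ∈ data_lines.takeWhile (fun l => !pvPred u l), l ≠ "") :
    get_merchandise_score data_lines u i =
      match data_lines.find? (pvPred u) with
      | none => 0
      | some l => ((PySem.List.pyGet? (pvTokensB l u) i).bind PySem.Int.ofStr?).getD 0 := by
  induction data_lines with
  | nil => simp [get_merchandise_score]
  | cons line rest ih =>
    by_cases hp : pvPred u line = true
    · unfold pvPred at hp
      rcases hc : PySem.Str.pyGet? line 0 with _ | c
      · rw [hc] at hp; simp at hp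
      · rw [hc] at hp
        have hcl : PySem.List.pyGet? line.toList 0 = some c := by simpa using hc
        have hq : String.ofList [c] = u := by simpa using hp
        have hfind : List.find? (pvPred u) (line :: rest) = some line := by
          simp [List.find?_cons, pvPred, hcl, hq]
        have ht : (List.filter (fun element => !element == u && !element == "")
            ((PySem.Str.split? line " ").getD [])) = pvTokensB line u := by
          unfold pvTokensB
          apply List.filter_congr
          intro e _
          cases he : (e == u) <;> cases he2 : (e == "") <;> simp [he, he2]
        simp [get_merchandise_score, hcl, hq]
        rw [ht, hfind]
    · have hline : line ≠ "" := by
        apply h; simp [hp]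
      rcases List.exists_cons_of_ne_nil (show line.toList ≠ [] by simp [hline]) with ⟨c, cs, hc⟩
      have hcl : PySem.List.pyGet? line.toList 0 = some c := by
        simp [PySem.List.pyGet?_zero, hc]
      have hq : ¬ String.ofList [c] = u := by
        intro hq
        exact hp (by simp [pvPred, hcl, hq])
      have hfind : List.find? (pvPred u) (line :: rest) = List.find? (pvPred u) rest := by
        simp [List.find?_cons, pvPred, hcl, hq]
      have hrec : get_merchandise_score (line :: rest) u i = get_merchandise_score rest u i := by
        simp [get_merchandise_score, hcl, hq]
      rw [hrec, hfind]
      apply ih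
      intro l hl
      apply h
      rw [List.takeWhile_cons, if_pos (by simpa [pvPred, hcl] using hq)]
      exact List.mem_cons_of_mem _ hl

theorem byChar_aux (data_lines : List String) (u : String) :
    ∀ d : PySem.Dict String String,
    (data_lines.foldl (fun d line =>
      match PySem.Str.pyGet? line 0 with
      | none => d
      | some c => if d.contains (String.ofList [c]) then d else d.insert (String.ofList [c]) line) d).get? u
      = match d.get? u with
        | some v => some v
        | none => data_lines.find? (pvPred u) := by
  induction data_lines with
  | nil => intro d; cases h : d.get? u <;> simp [h]
  | cons line rest ih =>
    intro d
    rcases hc : PySem.Str.pyGet? line 0 with _ | c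
    all_goals have hcl := hc
    all_goals simp only [PySem.Str.pyGet?_eq, PySem.Chars.pyGet?_eq_listPyGet?] at hcl
    · have hp : pvPred u line = false := by simp [pvPred, hcl]
      have hfind : List.find? (pvPred u) (line :: rest) = List.find? (pvPred u) rest := by
        simp [List.find?_cons, hp]
      simp only [List.foldl_cons, hc]
      rw [ih d, hfind]
    · by_cases hq : String.ofList [c] = u
      · have hp : pvPred u line = true := by simp [pvPred, hcl, hq]
        have hfind : List.find? (pvPred u) (line :: rest) = some line := by
          simp [List.find?_cons, hp]
        by_cases hcon : d.contains (String.ofList [c]) = true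
        · obtain ⟨v, hv⟩ := Option.isSome_iff_exists.mp
            (show (d.get? (String.ofList [c])).isSome = true by
              rw [← PySem.Dict.contains_eq_isSome_get?]; exact hcon)
          rw [hq] at hv
          simp only [List.foldl_cons, hc, if_pos hcon]
          rw [ih d, hv]
        · have hcf : d.contains (String.ofList [c]) = false := by simpa using hcon
          have hv : d.get? u = none := by
            rw [← hq]; exact (PySem.Dict.get?_eq_none_iff_contains d _).mpr hcf
          simp only [List.foldl_cons, hc, if_neg hcon]
          rw [ih, hq, PySem.Dict.get?_insert_self, hv, hfind]
      · have hp : pvPred u line = false := by simp [pvPred, hcl, hq]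
        have hfind : List.find? (pvPred u) (line :: rest) = List.find? (pvPred u) rest := by
          simp [List.find?_cons, hp]
        simp only [List.foldl_cons, hc]
        by_cases hcon : d.contains (String.ofList [c]) = true
        · rw [if_pos hcon, ih d, hfind]
        · rw [if_neg hcon, ih, hfind, PySem.Dict.get?_insert_of_ne _ _ (fun h => hq h.symm)]

theorem byChar_get? (data_lines : List String) (u : String) :
    (pvByChar data_lines).get? u = data_lines.find? (pvPred u) := by
  unfold pvByChar
  rw [byChar_aux]
  simp

theorem idx_aux (merchandises : List String) (m : String) :
    ∀ (s : Int) (d : PySem.Dict String Int),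
    (((PySem.List.enumerate merchandises s).foldl
      (fun d p => if d.contains p.2 then d else d.insert p.2 p.1)) d).get? m
      = match d.get? m with
        | some v => some v
        | none => (PySem.List.index? merchandises m).map (fun k => s + (k : Int)) := by
  induction merchandises with
  | nil => intro s d; cases h : d.get? m <;> simp [PySem.List.enumerate_nil, PySem.List.index?_eq_idxOf?, h]
  | cons x xs ih =>
    intro s d
    rw [PySem.List.enumerate_cons]
    by_cases hq : x = m
    · subst hq
      rw [PySem.List.index?_cons_self]
      by_cases hcon : d.contains x = true
      · obtain ⟨v, hv⟩ := Option.isSome_iff_exists.mp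
          (show (d.get? x).isSome = true by
            rw [← PySem.Dict.contains_eq_isSome_get?]; exact hcon)
        simp only [List.foldl_cons, if_pos hcon]
        rw [ih, hv]
      · have hcf : d.contains x = false := by simpa using hcon
        have hv : d.get? x = none := (PySem.Dict.get?_eq_none_iff_contains d _).mpr hcf
        simp only [List.foldl_cons, if_neg hcon]
        rw [ih, PySem.Dict.get?_insert_self, hv]
        simp
    · rw [PySem.List.index?_cons_of_ne _ hq]
      by_cases hcon : d.contains x = true
      · simp only [List.foldl_cons, if_pos hcon]
        rw [ih]
        cases hd : d.get? m
        · cases hi : PySem.List.index? xs m <;> simp [hi] <;> omega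
        · rfl
      · simp only [List.foldl_cons, if_neg hcon]
        rw [ih, PySem.Dict.get?_insert_of_ne _ _ (fun h => hq h.symm)]
        cases hd : d.get? m
        · cases hi : PySem.List.index? xs m <;> simp [hi] <;> omega
        · rfl

theorem idx_get? (merchandises : List String) (m : String) :
    (pvIdx merchandises).get? m = (PySem.List.index? merchandises m).map (fun k => (k : Int)) := by
  unfold pvIdx
  rw [idx_aux]
  simp


theorem init_data_matrix_spec : Claim_equal_init_data_matrix := by
  intro data_lines users merchandises _ hpre
  unfold Spec_init_data_matrix init_data_matrix init_data_matrix_alt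
  dsimp only
  have hd : users.foldl (fun (data_matrix : PySem.Dict String (PySem.Dict String Int)) user =>
      data_matrix.insert user
        (merchandises.foldl (fun (row : PySem.Dict String Int) merchandise =>
            let mindex := PySem.List.index? merchandises merchandise
            let mscore := match mindex with
              | some i => get_merchandise_score data_lines user (i : Int)
              | none => 0
            row.insert merchandise mscore) PySem.Dict.empty))
      PySem.Dict.empty
    = users.foldl (fun (result : PySem.Dict String (PySem.Dict String Int)) user =>
      match (pvByChar data_lines).get? user with
      | none =>
          result.insert user (merchandises.foldl (fun r m => r.insert m 0) PySem.Dict.empty)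
      | some line =>
          result.insert user (merchandises.foldl (fun r m =>
              r.insert m (((((pvIdx merchandises).get? m).bind
                (fun i => PySem.List.pyGet? (pvTokensB line user) i)).bind
                PySem.Int.ofStr?).getD 0)) PySem.Dict.empty)) PySem.Dict.empty := by
    apply PySem.List.foldl_congr_mem
    intro acc u hu
    dsimp only
    rw [byChar_get? data_lines u]
    rcases hpre with hnil | hpre
    · subst hnil
      cases data_lines.find? (pvPred u) <;> rfl
    · obtain ⟨hTW, hTok⟩ := hpre u hu
      cases hf : data_lines.find? (pvPred u) with
      | none =>
        congr 1
        apply PySem.List.foldl_congr_mem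
        intro r m hm
        obtain ⟨k, hk⟩ := Option.isSome_iff_exists.mp
          ((PySem.List.index?_isSome_iff (xs := merchandises) (v := m)).mpr hm)
        rw [hk]
        dsimp only
        rw [scoreA_eq_find data_lines u (k : Int) hTW, hf]
      | some l =>
        congr 1
        apply PySem.List.foldl_congr_mem
        intro r m hm
        obtain ⟨k, hk⟩ := Option.isSome_iff_exists.mp
          ((PySem.List.index?_isSome_iff (xs := merchandises) (v := m)).mpr hm)
        rw [hk]
        dsimp only
        rw [scoreA_eq_find data_lines u (k : Int) hTW, hf, idx_get?, hk]
        rfl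
  rw [hd]
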